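-- pv_equiv track=rewrite | github.com/catauggie/solve1 | MULT1.py | digProd
-- ===== SOURCE A (Python) =====
-- def digProd(n):
--     if (n<10):
--         if (n==0):
--             return 1
--         else:
--             return n
--     else:
--         k=n%10
--         if (k==0):
--             k=1
--         return k*digProd(n//10)
-- ===== SOURCE B (Python) =====
-- def digProd(n):
--     if n < 10:
--         return 1 if n == 0 else n
--     prod = 1
--     while n >= 10:
--         d = n % 10
--         prod *= d if d != 0 else 1
--         n //= 10
--     return prod * n
-- ===== Notes on version B (the rewrite author's own statement) =====
-- stated objective: alternative
-- what changed: Replaces A's recursion over the truncated number with an iterative digit-extraction loop maintaining a running product accumulator.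
import Mathlib
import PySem

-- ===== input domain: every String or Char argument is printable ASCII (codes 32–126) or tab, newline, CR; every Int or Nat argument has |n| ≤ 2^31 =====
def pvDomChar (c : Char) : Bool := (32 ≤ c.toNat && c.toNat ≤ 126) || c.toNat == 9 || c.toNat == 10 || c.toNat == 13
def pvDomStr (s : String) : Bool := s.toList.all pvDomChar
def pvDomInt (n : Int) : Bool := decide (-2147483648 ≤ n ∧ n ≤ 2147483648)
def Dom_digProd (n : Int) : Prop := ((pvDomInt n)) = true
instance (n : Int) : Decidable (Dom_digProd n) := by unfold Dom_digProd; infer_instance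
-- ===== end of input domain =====

-- B replaces A's recursion with an iterative accumulator loop (alternative decomposition, same cost).


-- ===== PORT A =====
def digProd (n : Int) : Int :=
  if n < 10 then
    if n = 0 then 1 else n
  else
    let k := PySem.Int.mod n 10
    let k := if k = 0 then 1 else k
    k * digProd (PySem.Int.floordiv n 10)
termination_by n.toNat
decreasing_by
  rename_i h
  rw [PySem.Int.floordiv_eq_ediv_of_pos (by omega)]
  omega

-- ===== PORT B =====
-- the while loop of Source B, with accumulator prod; 'return prod * n' is the n < 10 exit
def digProdLoop (n prod : Int) : Int :=
  if n < 10 then prod * n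
  else
    let d := PySem.Int.mod n 10
    digProdLoop (PySem.Int.floordiv n 10) (prod * (if d ≠ 0 then d else 1))
termination_by n.toNat
decreasing_by
  rename_i h
  rw [PySem.Int.floordiv_eq_ediv_of_pos (by omega)]
  omega

def digProd_alt (n : Int) : Int :=
  if n < 10 then
    if n = 0 then 1 else n
  else digProdLoop n 1

-- ===== PRECONDITION & SPEC =====
def Spec_digProd (n : Int) (out : Int) : Prop := out = digProd_alt n
instance (n : Int) (out : Int) : Decidable (Spec_digProd n out) := by unfold Spec_digProd; infer_instance

-- ===== CLAIM (what is proved, stated in full; the proofs are below) =====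
def Claim_equal_digProd : Prop := ∀ (n : Int), Dom_digProd n → Spec_digProd n (digProd n)

-- ===== LEMMAS AND PROOFS =====

-- loop invariant: for positive n the loop computes prod * digProd n
theorem digProdLoop_inv (n prod : Int) (hn : 1 ≤ n) : digProdLoop n prod = prod * digProd n := by
  induction n, prod using digProdLoop.induct with
  | case1 n prod h =>
    rw [digProdLoop, digProd]
    simp only [if_pos h]
    have : n ≠ 0 := by omega
    simp [this]
  | case2 n prod h d ih =>
    have hq : 1 ≤ PySem.Int.floordiv n 10 := by
      rw [PySem.Int.floordiv_eq_ediv_of_pos (by omega)]; omega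
    rw [digProdLoop, digProd]
    simp only [if_neg h]
    simp only [d, dite_eq_ite] at ih
    rw [ih hq]
    by_cases hd : PySem.Int.mod n 10 = 0 <;> simp [d, hd] <;> ring

-- ===== VERDICT (by name: the statement is the Claim_ definition above) =====
theorem digProd_spec : Claim_equal_digProd := by
  intro n _
  unfold Spec_digProd digProd_alt
  by_cases h : n < 10
  · rw [digProd]; simp [h]
  · simp only [if_neg h]
    rw [digProdLoop_inv n 1 (by omega), one_mul]
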